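-- pv_equiv track=rewrite | github.com/shenqiang1201/OD | Code/StringProcess/stringSample.py | loop
-- ===== SOURCE A (Python) =====
-- def canCombine(set1, set2):
--     for c in range(97, 123):
--         lc = chr(c)  # 小写字符
--         uc = chr(c - 32)  # 大写字符
--         if (lc in set1 or uc in set1) and (lc in set2 or uc in set2):
--             return True
--     return False
--
-- def loop(eqs):
--     for i in range(len(eqs)):
--         for j in range(i + 1, len(eqs)):
--             if canCombine(eqs[i], eqs[j]):
--                 tmp = list(eqs[i])
--                 tmp.extend(eqs[j])
--                 eqs[i] = set(tmp)
--                 eqs.pop(j)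
--                 return True
--     return False
-- ===== SOURCE B (Python) =====
-- def loop(eqs):
--     # One pass: keep the set of lowercased letters seen in earlier sets; a set
--     # sharing a letter with any earlier one is detected by one intersection.
--     # NOTE: returns the same value as the original, but does not mutate eqs.
--     seen = set()
--     for xs in eqs:
--         letters = set()
--         for s in xs:
--             if len(s) == 1:
--                 o = ord(s)
--                 if 97 <= o <= 122:
--                     letters.add(s)
--                 elif 65 <= o <= 90:
--                     letters.add(chr(o + 32))
--         if seen & letters:
--             return True
--         seen |= letters
--     return False
-- ===== Notes on version B (the rewrite author's own statement) =====
-- stated objective: alternative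
-- what changed: Replaced the quadratic all-pairs scan with its 26-letter inner probe by a single left-to-right pass that accumulates the set of lowercased letters seen so far and tests each set against it with one intersection; equivalence is about the return value only (A mutates eqs on success, B does not).
import Mathlib
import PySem

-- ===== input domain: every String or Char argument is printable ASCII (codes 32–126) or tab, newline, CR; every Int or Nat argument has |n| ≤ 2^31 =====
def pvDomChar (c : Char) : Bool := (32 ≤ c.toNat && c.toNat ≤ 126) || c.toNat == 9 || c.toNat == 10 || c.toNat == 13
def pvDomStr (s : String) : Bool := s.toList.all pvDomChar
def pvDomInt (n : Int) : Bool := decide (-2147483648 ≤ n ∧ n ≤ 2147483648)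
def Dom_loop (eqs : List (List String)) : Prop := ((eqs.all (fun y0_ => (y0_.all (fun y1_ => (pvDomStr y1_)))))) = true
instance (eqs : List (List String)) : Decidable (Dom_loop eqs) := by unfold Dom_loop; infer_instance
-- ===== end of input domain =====

-- B replaces the all-pairs letter scan by one pass that accumulates the set of lowercased
-- letters seen so far; equal RETURN value only — A mutates eqs in place on success, B does not.


-- ===== PORT A =====
-- canCombine: for c in range(97,123): if (chr(c) in set1 or chr(c-32) in set1) and (… in set2): return True
def canCombine (set1 set2 : List String) : Bool :=
  (PySem.List.pyRange 97 123 1).any (fun c =>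
    let lc := String.ofList [Char.ofNat c.toNat]
    let uc := String.ofList [Char.ofNat (c - 32).toNat]
    (set1.contains lc || set1.contains uc) && (set2.contains lc || set2.contains uc))

-- loop: nested index loops, first pair that canCombine returns True (the mutation of eqs
-- happens only on the returning branch, so it cannot affect the scan or the return value).
def loop (eqs : List (List String)) : Bool :=
  (PySem.List.pyRange 0 (eqs.length : Int) 1).any (fun i =>
    (PySem.List.pyRange (i + 1) (eqs.length : Int) 1).any (fun j =>
      canCombine (PySem.List.pyGetD eqs i []) (PySem.List.pyGetD eqs j [])))

-- ===== PORT B =====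
-- letters: the set of lowercased single ASCII letters occurring in xs
def lowerLettersOf (xs : List String) : PySem.Set Char :=
  xs.foldl (fun ls s =>
    match s.toList with
    | [ch] =>
      if 97 ≤ ch.toNat ∧ ch.toNat ≤ 122 then PySem.Set.add ls ch
      else if 65 ≤ ch.toNat ∧ ch.toNat ≤ 90 then PySem.Set.add ls (Char.ofNat (ch.toNat + 32))
      else ls
    | _ => ls) PySem.Set.empty

def loopAltGo : List (List String) → PySem.Set Char → Bool
  | [], _ => false
  | xs :: rest, seen =>
    let letters := lowerLettersOf xs
    if PySem.Set.inter seen letters ≠ [] then true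
    else loopAltGo rest (PySem.Set.union seen letters)

def loop_alt (eqs : List (List String)) : Bool :=
  loopAltGo eqs PySem.Set.empty

-- ===== PRECONDITION & SPEC =====
def Spec_loop (eqs : List (List String)) (out : Bool) : Prop := out = loop_alt eqs
instance (eqs : List (List String)) (out : Bool) : Decidable (Spec_loop eqs out) := by unfold Spec_loop; infer_instance

-- ===== CLAIM (what is proved, stated in full; the proofs are below) =====
def Claim_equal_loop : Prop := ∀ (eqs : List (List String)), Dom_loop eqs → Spec_loop eqs (loop eqs)

-- ===== LEMMAS AND PROOFS =====

-- the letter a string contributes to lowerLettersOf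
def produces (s : String) (c : Char) : Prop :=
  (s.toList = [c] ∧ 97 ≤ c.toNat ∧ c.toNat ≤ 122) ∨
  (∃ u, s.toList = [u] ∧ 65 ≤ u.toNat ∧ u.toNat ≤ 90 ∧ c = Char.ofNat (u.toNat + 32))

lemma toNat_ofNat_small {n : Nat} (h : n < 1000) : (Char.ofNat n).toNat = n := by
  have hv : n.isValidChar := Or.inl (by omega)
  simp [Char.ofNat, hv, Char.ofNatAux]

lemma produces_lower {s : String} {c : Char} (h : produces s c) :
    97 ≤ c.toNat ∧ c.toNat ≤ 122 := by
  rcases h with ⟨_, h1, h2⟩ | ⟨u, _, h1, h2, rfl⟩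
  · exact ⟨h1, h2⟩
  · rw [toNat_ofNat_small (by omega)]; omega

lemma mem_lowerLettersOf_aux (xs : List String) (acc : List Char) (c : Char) :
    c ∈ xs.foldl (fun ls s =>
      match s.toList with
      | [ch] =>
        if 97 ≤ ch.toNat ∧ ch.toNat ≤ 122 then PySem.Set.add ls ch
        else if 65 ≤ ch.toNat ∧ ch.toNat ≤ 90 then PySem.Set.add ls (Char.ofNat (ch.toNat + 32))
        else ls
      | _ => ls) acc ↔ c ∈ acc ∨ ∃ s ∈ xs, produces s c := by
  induction xs generalizing acc with
  | nil => simp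
  | cons x rest ih =>
    simp only [List.foldl_cons, ih, List.mem_cons]
    constructor
    · rintro (hm | hs)
      · rcases hx : x.toList with _ | ⟨ch, _ | _⟩ <;> simp only [hx] at hm
        · exact Or.inl hm
        · split_ifs at hm with h1 h2
          · rcases (PySem.Set.mem_add _ _ _).mp hm with h | rfl
            · exact Or.inl h
            · exact Or.inr ⟨x, Or.inl rfl, Or.inl ⟨hx, h1.1, h1.2⟩⟩
          · rcases (PySem.Set.mem_add _ _ _).mp hm with h | rfl
            · exact Or.inl h
            · exact Or.inr ⟨x, Or.inl rfl, Or.inr ⟨ch, hx, h2.1, h2.2, rfl⟩⟩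
          · exact Or.inl hm
        · exact Or.inl hm
      · exact Or.inr (hs.imp (fun s ⟨h1, h2⟩ => ⟨Or.inr h1, h2⟩))
    · rintro (hm | ⟨s, (rfl | hs), hp⟩)
      · left
        rcases hx : x.toList with _ | ⟨ch, _ | _⟩
        · exact hm
        · show c ∈ (if 97 ≤ ch.toNat ∧ ch.toNat ≤ 122 then PySem.Set.add acc ch
            else if 65 ≤ ch.toNat ∧ ch.toNat ≤ 90 then
              PySem.Set.add acc (Char.ofNat (ch.toNat + 32)) else acc)
          split_ifs <;> first | exact (PySem.Set.mem_add _ _ _).mpr (Or.inl hm) | exact hm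
        · exact hm
      · left
        rcases hp with ⟨hx, h1, h2⟩ | ⟨u, hx, h1, h2, rfl⟩ <;> simp only [hx] <;>
            split_ifs with hc1 hc2
        · exact (PySem.Set.mem_add _ _ _).mpr (Or.inr rfl)
        · exact absurd ⟨h1, h2⟩ hc1
        · exact absurd ⟨h1, h2⟩ hc1
        · exact absurd hc1 (by omega)
        · exact (PySem.Set.mem_add _ _ _).mpr (Or.inr rfl)
        · exact absurd ⟨h1, h2⟩ hc2
      · exact Or.inr ⟨s, hs, hp⟩

lemma mem_lowerLettersOf {xs : List String} {c : Char} :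
    c ∈ lowerLettersOf xs ↔ ∃ s ∈ xs, produces s c := by
  unfold lowerLettersOf
  rw [mem_lowerLettersOf_aux]
  simp [PySem.Set.empty]

-- shared-letter relation
def Shares (s t : List String) : Prop :=
  ∃ c, c ∈ lowerLettersOf s ∧ c ∈ lowerLettersOf t

lemma produces_iff_mem {s1 : List String} {c : Char}
    (hc : 97 ≤ c.toNat ∧ c.toNat ≤ 122) :
    (∃ s ∈ s1, produces s c) ↔
      (String.ofList [c] ∈ s1 ∨ String.ofList [Char.ofNat (c.toNat - 32)] ∈ s1) := by
  constructor
  · rintro ⟨s, hs, ⟨hx, _, _⟩ | ⟨u, hx, h1, h2, hcu⟩⟩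
    · left; have : s = String.ofList [c] := by rw [← hx]; simp
      rw [← this]; exact hs
    · right
      have hu : u = Char.ofNat (c.toNat - 32) := by
        have : c.toNat = u.toNat + 32 := by rw [hcu, toNat_ofNat_small (by omega)]
        rw [this]
        simp only [Nat.add_sub_cancel]
        exact (Char.ofNat_toNat u).symm
      have : s = String.ofList [Char.ofNat (c.toNat - 32)] := by rw [← hu, ← hx]; simp
      rw [← this]; exact hs
  · rintro (h | h)
    · exact ⟨_, h, Or.inl ⟨by simp, hc.1, hc.2⟩⟩
    · refine ⟨_, h, Or.inr ⟨Char.ofNat (c.toNat - 32), by simp, ?_, ?_, ?_⟩⟩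
      · rw [toNat_ofNat_small (by omega)]; omega
      · rw [toNat_ofNat_small (by omega)]; omega
      · rw [toNat_ofNat_small (by omega), Nat.sub_add_cancel (by omega),
            Char.ofNat_toNat]

lemma canCombine_iff {s1 s2 : List String} :
    canCombine s1 s2 = true ↔ Shares s1 s2 := by
  unfold canCombine Shares
  rw [List.any_eq_true]
  constructor
  · rintro ⟨ci, hci, hp⟩
    rw [PySem.List.mem_pyRange_one] at hci
    simp only [Bool.and_eq_true, Bool.or_eq_true, List.contains_eq_mem, decide_eq_true_eq] at hp
    set c : Char := Char.ofNat ci.toNat with hcdef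
    have hct : c.toNat = ci.toNat := toNat_ofNat_small (by omega)
    have hrange : 97 ≤ c.toNat ∧ c.toNat ≤ 122 := by rw [hct]; omega
    have huc : Char.ofNat (ci - 32).toNat = Char.ofNat (c.toNat - 32) := by
      rw [hct]; congr 1; omega
    refine ⟨c, ?_, ?_⟩ <;> rw [mem_lowerLettersOf, produces_iff_mem hrange]
    · rcases hp.1 with h | h
      · exact Or.inl h
      · right; rw [← huc]; exact h
    · rcases hp.2 with h | h
      · exact Or.inl h
      · right; rw [← huc]; exact h
  · rintro ⟨c, h1, h2⟩
    rw [mem_lowerLettersOf] at h1 h2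
    have hrange : 97 ≤ c.toNat ∧ c.toNat ≤ 122 := by
      obtain ⟨s, _, hp⟩ := h1; exact produces_lower hp
    rw [produces_iff_mem hrange] at h1 h2
    refine ⟨(c.toNat : Int), ?_, ?_⟩
    · rw [PySem.List.mem_pyRange_one]; omega
    · have h1' : Char.ofNat (c.toNat : Int).toNat = c := by
        simp only [Int.toNat_natCast]; exact Char.ofNat_toNat c
      have h2' : ((c.toNat : Int) - 32).toNat = c.toNat - 32 := by omega
      simp only [h1', h2', Bool.and_eq_true, Bool.or_eq_true, List.contains_eq_mem,
        decide_eq_true_eq]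
      exact ⟨h1.imp id id, h2.imp id id⟩

-- disjointness (negation of Shares), the Pairwise relation both sides reduce to
lemma loop_iff {eqs : List (List String)} :
    loop eqs = true ↔ ¬ List.Pairwise (fun s t => ¬ Shares s t) eqs := by
  unfold loop
  rw [List.pairwise_iff_getElem]
  simp only [List.any_eq_true, PySem.List.mem_pyRange_one, not_forall]
  constructor
  · rintro ⟨i, ⟨hi0, hin⟩, j, ⟨hji, hjn⟩, hcc⟩
    rw [canCombine_iff] at hcc
    refine ⟨i.toNat, j.toNat, by omega, by omega, by omega, ?_⟩
    rw [PySem.List.pyGetD_of_nonneg _ _ hi0, PySem.List.pyGetD_of_nonneg _ _ (by omega)] at hcc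
    rw [List.getD_eq_getElem _ _ (by omega), List.getD_eq_getElem _ _ (by omega)] at hcc
    exact not_not.mpr hcc
  · rintro ⟨i, j, hi, hj, hij, hns⟩
    rw [not_not] at hns
    refine ⟨(i : Int), ⟨by omega, by omega⟩, (j : Int), ⟨by omega, by omega⟩, ?_⟩
    rw [canCombine_iff]
    rw [PySem.List.pyGetD_of_nonneg _ _ (by omega), PySem.List.pyGetD_of_nonneg _ _ (by omega)]
    simp only [Int.toNat_natCast]
    rw [List.getD_eq_getElem _ _ hi, List.getD_eq_getElem _ _ hj]
    exact hns

lemma loopAltGo_iff (l : List (List String)) (seen : PySem.Set Char) :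
    loopAltGo l seen = true ↔
      (∃ xs ∈ l, ∃ c, c ∈ lowerLettersOf xs ∧ c ∈ seen) ∨
        ¬ List.Pairwise (fun s t => ¬ Shares s t) l := by
  induction l generalizing seen with
  | nil => simp [loopAltGo]
  | cons x rest ih =>
    simp only [loopAltGo]
    rw [List.pairwise_cons]
    by_cases hint : PySem.Set.inter seen (lowerLettersOf x) ≠ []
    · rw [if_pos hint]
      obtain ⟨c, hc⟩ := List.exists_mem_of_ne_nil _ hint
      rw [PySem.Set.mem_inter _ _ _] at hc
      simp only [true_iff]
      exact Or.inl ⟨x, List.mem_cons_self, c, hc.2, hc.1⟩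
    · rw [if_neg hint, ih]
      rw [not_ne_iff] at hint
      have hdisj : ∀ c, c ∈ lowerLettersOf x → c ∉ seen := by
        intro c hc hs
        have : c ∈ PySem.Set.inter seen (lowerLettersOf x) :=
          (PySem.Set.mem_inter _ _ _).mpr ⟨hs, hc⟩
        rw [hint] at this; exact absurd this (List.not_mem_nil)
      constructor
      · rintro (⟨xs, hxs, c, hc, hcs⟩ | hnp)
        · rw [PySem.Set.mem_union _ _ _] at hcs
          rcases hcs with hcs | hcs
          · exact Or.inl ⟨xs, List.mem_cons_of_mem _ hxs, c, hc, hcs⟩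
          · right; rintro ⟨hall, -⟩
            exact hall xs hxs ⟨c, hcs, hc⟩
        · right; rintro ⟨-, hp⟩; exact hnp hp
      · rintro (⟨xs, hxs, c, hc, hcs⟩ | hnp)
        · rcases List.mem_cons.mp hxs with rfl | hxs
          · exact absurd hcs (hdisj c hc)
          · exact Or.inl ⟨xs, hxs, c, hc, (PySem.Set.mem_union _ _ _).mpr (Or.inl hcs)⟩
        · by_cases hall : ∀ t ∈ rest, ¬ Shares x t
          · right; intro hp; exact hnp ⟨hall, hp⟩
          · simp only [not_forall, not_not, exists_prop] at hall
            obtain ⟨t, ht, hs⟩ := hall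
            obtain ⟨c, hcx, hct⟩ := hs
            exact Or.inl ⟨t, ht, c, hct, (PySem.Set.mem_union _ _ _).mpr (Or.inr hcx)⟩

-- ===== VERDICT (by name: the statement is the Claim_ definition above) =====
theorem loop_spec : Claim_equal_loop := by
  intro eqs _
  unfold Spec_loop loop_alt
  have hB := loopAltGo_iff eqs PySem.Set.empty
  simp only [PySem.Set.empty, List.not_mem_nil, and_false, exists_false, false_or] at hB
  show loop eqs = loopAltGo eqs []
  exact Bool.eq_iff_iff.mpr (loop_iff.trans hB.symm)
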